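-- pv_equiv track=rewrite | github.com/sammyzord/interview-prep | questions/question2.py | find_next_peak
-- ===== SOURCE A (Python) =====
-- def find_next_peak(st: int, x: list[int]):
--     if st == len(x) -1:
--         return False
--     l = len(x)
--     s = [x[st], st]
--     y = [x[st+1], st+1, False]
--
--     for i in range(st+1, l):
--         if x[i] >= s[0]:
--             return i
--         else:
--             if x[i] >= y[0]:
--                 y[0] = x[i]
--                 y[1] = i
--                 y[2] = True
--
--     if not y[2]:
--         return False
--     return y[1]
-- ===== SOURCE B (Python) =====
-- def find_next_peak(st: int, x: list[int]):
--     if st == len(x) - 1: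
--         return False
--     base = x[st]
--     for i in range(st + 1, len(x)):
--         if x[i] >= base:
--             return i
--     # no element >= x[st]: index of the maximum of the tail,
--     # ties broken toward the larger index
--     return max(range(st + 1, len(x)), key=lambda i: (x[i], i))
-- ===== Notes on version B (the rewrite author's own statement) =====
-- stated objective: simpler
-- what changed: Replaces A's single interleaved scan with combined running-max bookkeeping (list-as-record state s/y with a dead 'found' flag) by two separate plain passes: first a loop returning the first index with x[i] >= x[st], then, only if that fails, a standalone argmax over the tail with ties toward the larger index.
-- outside the precondition, e.g. on find_next_peak(2, [1, 2, 3]): A returns False, B returns False; on find_next_peak(5, [1, 2, 3]): A raises IndexError, B raises IndexError; on find_next_peak(-1, []): A returns False, B returns False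
import Mathlib
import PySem

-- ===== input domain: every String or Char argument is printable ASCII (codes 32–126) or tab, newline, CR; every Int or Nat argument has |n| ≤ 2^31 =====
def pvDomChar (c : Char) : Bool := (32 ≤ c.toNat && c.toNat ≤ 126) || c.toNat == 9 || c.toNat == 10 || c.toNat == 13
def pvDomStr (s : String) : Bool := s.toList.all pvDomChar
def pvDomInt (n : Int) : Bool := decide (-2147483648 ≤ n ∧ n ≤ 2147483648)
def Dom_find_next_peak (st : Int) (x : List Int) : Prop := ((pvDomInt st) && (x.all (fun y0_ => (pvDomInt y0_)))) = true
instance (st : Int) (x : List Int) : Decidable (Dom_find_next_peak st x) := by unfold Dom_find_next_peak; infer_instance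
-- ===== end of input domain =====

-- B replaces A's single interleaved scan (running-max record updated inside the search loop)
-- by two separate plain passes: find the first i with x[i] >= x[st], else a standalone
-- last-tie argmax of the tail; objective: simpler.

-- ===== PORT A =====
-- A's for-loop with early return and mutable y = [y0, y1, y2] state.
def findA_loop (x : List Int) (s0 : Int) (y0 y1 : Int) (y2 : Bool) :
    List Int → Option Int
  | [] => if !y2 then none else some y1
  | i :: rest =>
    match PySem.List.pyGet? x i with
    | none => none            -- IndexError (unreachable for in-range i)
    | some xi =>
      if xi ≥ s0 then some i
      else if xi ≥ y0 then findA_loop x s0 xi i true rest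
      else findA_loop x s0 y0 y1 y2 rest

def find_next_peak (st : Int) (x : List Int) : Option Int :=
  if st = (x.length : Int) - 1 then none   -- `return False` (not an int): outside Pre_
  else
    let l : Int := x.length
    match PySem.List.pyGet? x st, PySem.List.pyGet? x (st + 1) with
    | some xst, some xst1 =>
      findA_loop x xst xst1 (st + 1) false (PySem.List.pyRange (st + 1) l 1)
    | _, _ => none                          -- IndexError: outside Pre_

-- ===== PORT B =====
-- first pass: first index i in is with x[i] >= base
def findB_first (x : List Int) (base : Int) : List Int → Option Int
  | [] => none
  | i :: rest =>
    match PySem.List.pyGet? x i with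
    | none => none
    | some xi => if xi ≥ base then some i else findB_first x base rest

-- second pass: max(is, key=λ i, (x[i], i)) — lexicographic, strict replacement
def findB_argmax (x : List Int) (bi bv : Int) : List Int → Option Int
  | [] => some bi
  | i :: rest =>
    match PySem.List.pyGet? x i with
    | none => none
    | some xi =>
      if xi > bv ∨ (xi = bv ∧ i > bi) then findB_argmax x i xi rest
      else findB_argmax x bi bv rest

def find_next_peak_alt (st : Int) (x : List Int) : Option Int :=
  if st = (x.length : Int) - 1 then none   -- `return False`: outside Pre_
  else
    match PySem.List.pyGet? x st with
    | none => none
    | some base =>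
      let idxs := PySem.List.pyRange (st + 1) (x.length : Int) 1
      match findB_first x base idxs with
      | some i => some i
      | none =>
        match idxs with
        | [] => none                        -- max() of empty range raises: outside Pre_
        | j :: rest =>
          match PySem.List.pyGet? x j with
          | none => none
          | some xj => findB_argmax x j xj rest

-- ===== PRECONDITION & SPEC =====
-- Pre_ excludes st = len(x)-1 (A returns the bool False, not an int) and st out of
-- Python's index range (A raises IndexError); negative in-range st (wraparound) is kept.
def Pre_find_next_peak (st : Int) (x : List Int) : Prop :=
  -(x.length : Int) ≤ st ∧ st < (x.length : Int) - 1
instance (st : Int) (x : List Int) : Decidable (Pre_find_next_peak st x) := by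
  unfold Pre_find_next_peak; infer_instance

def pvWitness_find_next_peak : Int × List Int := (0, [5, 1, 4, 2])

def Spec_find_next_peak (st : Int) (x : List Int) (out : Option Int) : Prop :=
  out = find_next_peak_alt st x
instance (st : Int) (x : List Int) (out : Option Int) : Decidable (Spec_find_next_peak st x out) := by
  unfold Spec_find_next_peak; infer_instance

-- ===== CLAIM (what is proved, stated in full; the proofs are below) =====
def Claim_equal_find_next_peak : Prop :=
  ∀ (st : Int) (x : List Int), Dom_find_next_peak st x → Pre_find_next_peak st x →
    Spec_find_next_peak st x (find_next_peak st x)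

-- ===== LEMMAS AND PROOFS =====

-- Core invariant: once the `y2` flag is true, A's interleaved loop equals
-- B's first-match pass followed (on failure) by B's argmax pass, provided the
-- remaining indices are valid, strictly increasing, and all above the current best index.
theorem loop_eq (x : List Int) (base y0 y1 : Int) (is : List Int)
    (hv : ∀ i ∈ is, (PySem.List.pyGet? x i).isSome)
    (hy : ∀ i ∈ is, y1 < i)
    (hp : is.Pairwise (· < ·)) :
    findA_loop x base y0 y1 true is =
      (match findB_first x base is with
       | some i => some i
       | none => findB_argmax x y1 y0 is) := by
  induction is generalizing y0 y1 with
  | nil => simp [findA_loop, findB_first, findB_argmax]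
  | cons i rest ih =>
    have hvi : (PySem.List.pyGet? x i).isSome := hv i (by simp)
    obtain ⟨xi, hxi⟩ := Option.isSome_iff_exists.mp hvi
    have hyi : y1 < i := hy i (by simp)
    have hv' : ∀ j ∈ rest, (PySem.List.pyGet? x j).isSome := fun j hj => hv j (by simp [hj])
    have hi_rest : ∀ j ∈ rest, i < j := (List.pairwise_cons.mp hp).1
    have hp' := (List.pairwise_cons.mp hp).2
    simp only [findA_loop, findB_first, findB_argmax, hxi]
    by_cases hge : xi ≥ base
    · simp [hge]
    · simp only [hge, if_false]
      by_cases hup : xi ≥ y0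
      · -- A updates its running max to (xi, i)
        have hcond : xi > y0 ∨ (xi = y0 ∧ i > y1) := by omega
        simp only [hup, if_true, hcond, if_true]
        exact ih xi i hv' hi_rest hp'
      · -- A keeps (y0, y1)
        have hcond : ¬ (xi > y0 ∨ (xi = y0 ∧ i > y1)) := by omega
        simp only [hup, if_false, hcond, if_false]
        exact ih y0 y1 hv' (fun j hj => lt_trans hyi (hi_rest j hj)) hp'

-- ===== VERDICT (by name: the statement is the Claim_ definition above) =====
theorem find_next_peak_spec : Claim_equal_find_next_peak := by
  intro st x _ hpre
  obtain ⟨h1, h2⟩ := hpre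
  unfold Spec_find_next_peak find_next_peak find_next_peak_alt
  have hne : ¬ st = (x.length : Int) - 1 := by omega
  simp only [hne, if_false]
  have hst : (PySem.List.pyGet? x st).isSome := by
    rw [Option.isSome_iff_ne_none]
    intro h
    rw [PySem.List.pyGet?_eq_none_iff] at h
    exact h ⟨h1, by omega⟩
  obtain ⟨base, hbase⟩ := Option.isSome_iff_exists.mp hst
  have hst1 : (PySem.List.pyGet? x (st + 1)).isSome := by
    rw [Option.isSome_iff_ne_none]
    intro h
    rw [PySem.List.pyGet?_eq_none_iff] at h
    exact h ⟨by omega, by omega⟩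
  obtain ⟨x1, hx1⟩ := Option.isSome_iff_exists.mp hst1
  simp only [hbase, hx1]
  -- peel the first index st+1 off the range
  have hcons : PySem.List.pyRange (st + 1) (x.length : Int) 1
      = (st + 1) :: PySem.List.pyRange (st + 1 + 1) (x.length : Int) 1 :=
    PySem.List.pyRange_one_cons (by omega)
  rw [hcons]
  have hv : ∀ i ∈ PySem.List.pyRange (st + 1 + 1) (x.length : Int) 1,
      (PySem.List.pyGet? x i).isSome := by
    intro i hi
    rw [PySem.List.mem_pyRange_one] at hi
    rw [Option.isSome_iff_ne_none]
    intro h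
    rw [PySem.List.pyGet?_eq_none_iff] at h
    exact h ⟨by omega, by omega⟩
  have hy : ∀ i ∈ PySem.List.pyRange (st + 1 + 1) (x.length : Int) 1, st + 1 < i := by
    intro i hi
    rw [PySem.List.mem_pyRange_one] at hi
    omega
  have hp := PySem.List.pairwise_lt_pyRange_one (a := st + 1 + 1) (b := (x.length : Int))
  -- first iteration of A's loop
  simp only [findA_loop, findB_first, hx1, le_refl, ge_iff_le, if_true]
  by_cases hge : base ≤ x1
  · simp [hge]
  · simp only [hge, if_false]
    rw [loop_eq x base x1 (st + 1) _ hv hy hp]
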